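-- pv_equiv track=rewrite | github.com/KumarAmbuj/gfg_greedyalgo_miscellaneous | 3.max stock.py | maxstock
-- ===== SOURCE A (Python) =====
-- def maxstock(arr,k):
--     n=len(arr)
--     count=0
--     sum=0
--     i=1
--     while(sum<k ):
--
--         if i>n:
--             return count
--
--         a=arr[i-1]
--
--         for j in range(i):
--             sum=sum+a
--             if sum>=k:
--                 return count
--             else:
--                 count+=1
--         i+=1
-- ===== SOURCE B (Python) =====
-- def maxstock(arr, k):
--     # Per-block arithmetic: block i adds arr[i-1] i times; compute the crossing
--     # step with ceiling division instead of simulating each unit increment.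
--     count = 0
--     s = 0
--     for i, a in enumerate(arr, 1):
--         if s >= k:
--             return count
--         if a > 0:
--             t = -(-(k - s) // a)   # ceil((k - s) / a), smallest t with s + t*a >= k
--             if t <= i:
--                 return count + t - 1
--         count += i
--         s += i * a
--     return count
-- ===== Notes on version B (the rewrite author's own statement) =====
-- stated objective: alternative
-- what changed: B replaces A's inner unit-by-unit increment loop with a closed-form ceiling-division computation of the crossing step per block, one pass over the array.
-- outside the precondition, e.g. on maxstock([1], 0): A returns None, B returns 0
import Mathlib
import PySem

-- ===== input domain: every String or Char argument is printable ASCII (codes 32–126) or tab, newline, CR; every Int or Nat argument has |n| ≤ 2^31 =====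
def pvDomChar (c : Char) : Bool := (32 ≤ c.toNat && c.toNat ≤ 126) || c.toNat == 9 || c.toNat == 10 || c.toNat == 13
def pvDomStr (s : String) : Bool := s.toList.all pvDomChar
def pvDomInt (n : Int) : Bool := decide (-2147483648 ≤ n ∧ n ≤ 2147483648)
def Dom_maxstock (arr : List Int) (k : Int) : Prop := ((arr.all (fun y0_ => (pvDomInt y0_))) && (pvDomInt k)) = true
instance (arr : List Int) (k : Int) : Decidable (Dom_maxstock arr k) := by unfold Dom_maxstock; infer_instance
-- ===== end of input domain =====

-- B replaces A's inner unit-by-unit increment loop with a per-block ceiling-division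
-- computation of the crossing step; equivalence is proved for k > 0
-- (for k ≤ 0 Python A falls off the while loop and returns None, not an int).

-- ===== PORT A =====
-- inner 'for j in range(i)' loop: .inl c = early 'return count', .inr (count, sum) = loop done
def pvInnerA (a k : Int) : Nat → Int → Int → Sum Int (Int × Int)
  | 0, count, s => .inr (count, s)
  | j + 1, count, s =>
      let s' := s + a
      if s' ≥ k then .inl count
      else pvInnerA a k j (count + 1) s'

-- outer 'while sum < k' loop; fuel n+1 suffices since i increases each pass and the
-- loop returns once i > n.  In the 'sum ≥ k' case Python returns None (outside Pre_).
def pvOuterA (arr : List Int) (k : Int) (n : Nat) : Nat → Nat → Int → Int → Int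
  | 0, _, count, _ => count
  | f + 1, i, count, s =>
      if s < k then
        if (i : Int) > (n : Int) then count
        else
          let a := (PySem.List.pyGet? arr ((i : Int) - 1)).getD 0
          match pvInnerA a k i count s with
          | .inl c => c
          | .inr (c, s') => pvOuterA arr k n f (i + 1) c s'
      else count

def maxstock (arr : List Int) (k : Int) : Int :=
  pvOuterA arr k arr.length (arr.length + 1) 1 0 0

-- ===== PORT B =====
def pvAltGo (k : Int) : List Int → Nat → Int → Int → Int
  | [], _, count, _ => count
  | a :: rest, i, count, s =>
      if s ≥ k then count
      else if a > 0 then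
        let t := -(PySem.Int.floordiv (-(k - s)) a)   -- ceil((k - s) / a)
        if t ≤ (i : Int) then count + t - 1
        else pvAltGo k rest (i + 1) (count + (i : Int)) (s + (i : Int) * a)
      else pvAltGo k rest (i + 1) (count + (i : Int)) (s + (i : Int) * a)

def maxstock_alt (arr : List Int) (k : Int) : Int :=
  pvAltGo k arr 1 0 0

-- ===== PRECONDITION & SPEC =====
-- Pre_ excludes k ≤ 0, on which Python A's while loop never runs and A returns None (not an int).
def Pre_maxstock (arr : List Int) (k : Int) : Prop := 0 < k
instance (arr : List Int) (k : Int) : Decidable (Pre_maxstock arr k) := by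
  unfold Pre_maxstock; infer_instance

def pvWitness_maxstock : List Int × Int := ([2, 1], 3)

def Spec_maxstock (arr : List Int) (k : Int) (out : Int) : Prop := out = maxstock_alt arr k
instance (arr : List Int) (k : Int) (out : Int) : Decidable (Spec_maxstock arr k out) := by
  unfold Spec_maxstock; infer_instance

-- ===== CLAIM (what is proved, stated in full; the proofs are below) =====
def Claim_equal_maxstock : Prop := ∀ (arr : List Int) (k : Int), Dom_maxstock arr k → Pre_maxstock arr k → Spec_maxstock arr k (maxstock arr k)

-- ===== LEMMAS AND PROOFS =====

-- If no partial sum s + j*a (1 ≤ j ≤ m) reaches k, the inner loop runs to completion.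
theorem pvInnerA_nocross (a k : Int) :
    ∀ (m : Nat) (count s : Int), s < k → s + (m : Int) * a < k →
      pvInnerA a k m count s = .inr (count + (m : Int), s + (m : Int) * a) := by
  intro m
  induction m with
  | zero => intro count s h1 h2; simp [pvInnerA]
  | succ m ih =>
      intro count s h1 h2
      have hm1 : ((m + 1 : Nat) : Int) = (m : Int) + 1 := by push_cast; ring
      rw [hm1] at h2
      have hlt : s + a < k := by nlinarith [sq_nonneg ((m : Int))]
      have : ¬ (s + a ≥ k) := by omega
      simp only [pvInnerA, if_neg this]
      rw [ih (count + 1) (s + a) hlt (by nlinarith)]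
      rw [hm1]
      simp only [Sum.inr.injEq, Prod.mk.injEq]
      constructor <;> ring

-- If t is the first step with s + t*a ≥ k and t ≤ m, the inner loop returns count + t - 1.
theorem pvInnerA_cross (a k : Int) (ha : 0 < a) :
    ∀ (m : Nat) (t count s : Int), 1 ≤ t → t ≤ (m : Int) →
      s + (t - 1) * a < k → k ≤ s + t * a →
      pvInnerA a k m count s = .inl (count + t - 1) := by
  intro m
  induction m with
  | zero => intro t count s h1 h2 _ _; omega
  | succ m ih =>
      intro t count s h1 h2 h3 h4
      by_cases hc : s + a ≥ k
      · have ht1 : t = 1 := by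
          by_contra hne
          have : 2 ≤ t := by omega
          have : s + a ≤ s + (t - 1) * a := by nlinarith
          omega
        simp [pvInnerA, hc, ht1]
      · have ht2 : 2 ≤ t := by
          by_contra hne
          have h1t : t = 1 := by omega
          rw [h1t, one_mul] at h4
          omega
        simp only [pvInnerA, if_neg hc]
        have := ih (t - 1) (count + 1) (s + a) (by omega)
          (by push_cast at h2 ⊢; omega)
          (by nlinarith) (by nlinarith)
        rw [this]; congr 1; ring

-- The ceiling-division step of B is exactly the first crossing step.
theorem pvCeil_spec (a k s : Int) (ha : 0 < a) (hs : s < k) :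
    1 ≤ -(PySem.Int.floordiv (-(k - s)) a) ∧
    s + (-(PySem.Int.floordiv (-(k - s)) a) - 1) * a < k ∧
    k ≤ s + (-(PySem.Int.floordiv (-(k - s)) a)) * a := by
  set t := -(PySem.Int.floordiv (-(k - s)) a) with ht
  have hiff := (PySem.Int.neg_floordiv_neg_eq_iff_of_pos (a := k - s) (b := a) (q := t) ha).mp ht.symm
  obtain ⟨hlo, hhi⟩ := hiff
  refine ⟨?_, by nlinarith, by nlinarith⟩
  by_contra hle
  have : t ≤ 0 := by omega
  nlinarith

-- Main loop correspondence: at outer position i (1-based) with remaining list rest.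
theorem pvMain (arr : List Int) (k : Int) :
    ∀ (rest : List Int) (i : Nat) (count s : Int), 1 ≤ i →
      arr.drop (i - 1) = rest → s < k →
      pvOuterA arr k arr.length (rest.length + 1) i count s = pvAltGo k rest i count s := by
  intro rest
  induction rest with
  | nil =>
      intro i count s hi hdrop hs
      have hlen : arr.length ≤ i - 1 := by
        simpa [List.drop_eq_nil_iff] using hdrop
      have : (i : Int) > (arr.length : Int) := by
        have := Nat.lt_of_le_of_lt hlen (Nat.sub_lt (by omega) (by omega))
        exact_mod_cast this
      simp [pvOuterA, pvAltGo, hs, this]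
  | cons a rest ih =>
      intro i count s hi hdrop hs
      have hil : i - 1 < arr.length := by
        by_contra h
        have : arr.drop (i - 1) = [] := List.drop_eq_nil_iff.mpr (by omega)
        rw [this] at hdrop; exact (List.cons_ne_nil a rest) hdrop.symm
      have hnot : ¬ ((i : Int) > (arr.length : Int)) := by
        have : i ≤ arr.length := by omega
        exact_mod_cast not_lt.mpr (by exact_mod_cast this)
      have hidx : ((i : Int) - 1) = ((i - 1 : Nat) : Int) := by push_cast; omega
      have hget : (PySem.List.pyGet? arr ((i : Int) - 1)).getD 0 = a := by
        rw [hidx, PySem.List.pyGet?_natCast]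
        have : arr[i - 1]? = some a := by
          rw [← List.head?_drop, hdrop]; rfl
        simp [this]
      have hdrop' : arr.drop i = rest := by
        have : arr.drop (i - 1 + 1) = rest := by
          rw [← List.drop_drop, hdrop]
          · rfl
        simpa [Nat.sub_add_cancel hi] using this
      have hns : ¬ (s ≥ k) := by omega
      simp only [pvOuterA, List.length_cons, if_pos hs, if_neg hnot, hget, pvAltGo, if_neg hns]
      by_cases hap : a > 0
      · obtain ⟨ht1, htlo, hthi⟩ := pvCeil_spec a k s hap hs
        set t := -(PySem.Int.floordiv (-(k - s)) a) with ht
        by_cases hti : t ≤ (i : Int)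
        · rw [pvInnerA_cross a k hap i t count s ht1 hti htlo hthi]
          simp [hap, hti]
        · have hslt : s + (i : Int) * a < k := by
            have : (i : Int) ≤ t - 1 := by omega
            nlinarith
          rw [pvInnerA_nocross a k i count s hs hslt]
          simp only [hap, if_neg hti]
          exact ih (i + 1) (count + (i : Int)) (s + (i : Int) * a) (by omega)
            (by simpa using hdrop') hslt
      · have hslt : s + (i : Int) * a < k := by
          have h1 : (0 : Int) ≤ (i : Int) := by positivity
          nlinarith
        rw [pvInnerA_nocross a k i count s hs hslt]
        simp only [if_neg hap]
        exact ih (i + 1) (count + (i : Int)) (s + (i : Int) * a) (by omega)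
          (by simpa using hdrop') hslt

-- ===== VERDICT (by name: the statement is the Claim_ definition above) =====
theorem maxstock_spec : Claim_equal_maxstock := by
  intro arr k _ hpre
  unfold Spec_maxstock maxstock maxstock_alt
  exact pvMain arr k arr (i := 1) 0 0 (by omega) (by simp) hpre
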